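-- pv_equiv track=rewrite | github.com/msheby/cacm-upstart-puzzles | 202005.py | get_minimum_average_duration_sequences
-- ===== SOURCE A (Python) =====
-- NUM_TIME_SEQUENCES = 24 * 4
--
-- def get_chiming_sequence(n=0, b=10):
--     """
--     Given a radix *n* and a base *b*,
--     create a list containing *n* expressed in base-*b*.
--     If the least-significant digit would be zero or
--     if there would be two consecutive zeroes,
--     return None as it is not a valid chiming sequence.
--     Otherwise, return the list.
--
--     Parameters
--     ----------
--     n : int (default 0)
--         A nonnegative integer.
--     b : int (default 10)
--         A nonnegative integer radix.
--     """
--     number = int(n)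
--     if number < 0:
--         raise ValueError
--     base = int(b)
--     if base < 1:
--         raise ValueError
--     saw_zero = False
--     representation = []
--     if number == 0:
--         representation.append(0)
--         saw_zero = True
--     elif base == 1:
--         representation.extend([1 for _ in range(number)])
--     else:
--         while number:
--             digit = number % base
--             if digit == 0:
--                 if saw_zero:
--                     return None
--                 saw_zero = True
--             else:
--                 saw_zero = False
--             representation.append(digit)
--             number //= base
--     if representation[0] == 0:
--         return None
--     return representation[::-1]
--
-- def get_minimum_average_duration_sequences(k=1):
--     """
--     Find a minimum average duration uniquely decodable code
--     assuming there can be *k* different tones of bells in every cathedral.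
--
--     Parameters
--     ----------
--     k : int (default 1)
--         Number of different tones in the bell towers.
--     """
--     base = int(k) + 1
--     if base < 2:
--         raise ValueError
--     ndigits = 0
--     chiming_sequences = []
--     while len(chiming_sequences) < NUM_TIME_SEQUENCES:
--         ndigits += 1
--         maximum = base ** ndigits
--         if maximum < NUM_TIME_SEQUENCES:
--             # don't waste time
--             continue
--         chiming_sequences = [chiming_sequence for chiming_sequence in
--                              [get_chiming_sequence(n, base)
--                               for n in range(maximum)]
--                              if chiming_sequence]
--     return chiming_sequences[:NUM_TIME_SEQUENCES]
-- ===== SOURCE B (Python) =====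
-- NUM_TIME_SEQUENCES = 24 * 4
--
-- def _extend(base, prefix, remaining, out):
--     """Append to *out*, in lexicographic order, every valid completion of
--     *prefix* by *remaining* more digits (no two consecutive zeroes, last
--     digit nonzero), stopping once *out* holds NUM_TIME_SEQUENCES entries."""
--     if remaining == 0:
--         if prefix[-1] != 0:
--             out.append(list(prefix))
--         return
--     for d in range(base):
--         if len(out) >= NUM_TIME_SEQUENCES:
--             break
--         if d == 0 and prefix[-1] == 0:
--             continue
--         prefix.append(d)
--         _extend(base, prefix, remaining - 1, out)
--         prefix.pop()
--
-- def get_minimum_average_duration_sequences(k=1):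
--     base = int(k) + 1
--     if base < 2:
--         raise ValueError
--     out = []
--     length = 1
--     while len(out) < NUM_TIME_SEQUENCES:
--         for first in range(1, base):
--             if len(out) >= NUM_TIME_SEQUENCES:
--                 break
--             _extend(base, [first], length - 1, out)
--         length += 1
--     return out
-- ===== Notes on version B (the rewrite author's own statement) =====
-- stated objective: faster
-- what changed: A enumerates every integer below base**ndigits, converts each to digits and filters the valid chiming sequences (recomputing the whole scan for each candidate ndigits); B generates exactly the valid constrained digit strings directly, by length and then lexicographically, stopping as soon as 96 are produced.
import Mathlib
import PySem

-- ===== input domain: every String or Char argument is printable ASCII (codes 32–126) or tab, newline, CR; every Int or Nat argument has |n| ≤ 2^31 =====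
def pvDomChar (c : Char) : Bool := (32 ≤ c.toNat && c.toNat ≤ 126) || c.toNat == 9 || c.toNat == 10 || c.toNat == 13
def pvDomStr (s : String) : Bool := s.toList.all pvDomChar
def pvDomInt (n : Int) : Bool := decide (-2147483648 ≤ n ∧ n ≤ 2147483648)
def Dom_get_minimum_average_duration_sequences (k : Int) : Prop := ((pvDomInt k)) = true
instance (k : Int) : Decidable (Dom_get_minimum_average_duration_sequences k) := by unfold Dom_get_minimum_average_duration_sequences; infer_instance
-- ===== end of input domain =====

-- B replaces A's "try every number below base**ndigits and filter" scan by a direct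
-- lexicographic generation of the valid digit strings, stopping at 96 (faster: asymptotic).

-- ===== PORT A =====
-- while number: loop of get_chiming_sequence (only reached with number > 0, base ≥ 2).
-- fuel is a totality guard only: number strictly decreases each iteration, so
-- number.toNat iterations always suffice and the fuel never runs out on reachable calls.
def pvChimingLoop (fuel : Nat) (base number : Int) (sawZero : Bool) (rep : List Int) : Option (List Int) :=
  match fuel with
  | 0 => some rep
  | fuel + 1 =>
    if 0 < number then   -- while number:
      let digit := PySem.Int.mod number base
      if digit = 0 then
        if sawZero then none
        else pvChimingLoop fuel base (PySem.Int.floordiv number base) true (rep ++ [digit])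
      else pvChimingLoop fuel base (PySem.Int.floordiv number base) false (rep ++ [digit])
    else some rep

def pvGetChimingSequence (n b : Int) : Option (List Int) :=
  if n < 0 then none        -- Python: raise ValueError (unreachable from the outer function)
  else if b < 1 then none   -- Python: raise ValueError (unreachable from the outer function)
  else
    let repOpt : Option (List Int) :=
      if n = 0 then some [0]
      else if b = 1 then some (List.replicate n.toNat 1)  -- [1 for _ in range(number)]
      else pvChimingLoop n.toNat b n false []
    match repOpt with
    | none => none
    | some rep =>
        -- representation[0] == 0; rep is nonempty on every reachable path
        if rep.headD 1 = 0 then none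
        else some rep.reverse   -- representation[::-1]

-- while len(chiming_sequences) < 96 loop; fuel is a totality guard only
-- (for base ≥ 2 the loop always terminates well within 64 iterations)
def pvOuterLoop (base : Int) (fuel : Nat) (ndigits : Int) (seqs : List (List Int)) : List (List Int) :=
  match fuel with
  | 0 => seqs
  | fuel + 1 =>
    if seqs.length < 96 then
      pvOuterLoop base fuel (ndigits + 1)
        (if base ^ (ndigits + 1).toNat < 96 then seqs   -- "don't waste time" continue
         else (((PySem.List.pyRange 0 (base ^ (ndigits + 1).toNat) 1).map
                  (fun n => pvGetChimingSequence n base)).filterMap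
                  (fun c => c.bind (fun l => if l.isEmpty then none else some l))))
    else seqs

def get_minimum_average_duration_sequences (k : Int) : List (List Int) :=
  if k + 1 < 2 then []   -- Python: raise ValueError; excluded by Pre_
  else (pvOuterLoop (k + 1) 64 0 []).take 96   -- chiming_sequences[:96]

-- ===== PORT B =====
-- _extend and its for-d loop (B mutates prefix/out in place; the port threads them as
-- values). fuel is a totality guard only: each recursive call is one step along a call
-- chain whose length is bounded (the d-loop breaks once out holds 96 entries), so the
-- literal fuel 100000 supplied below never runs out on reachable calls.
mutual
def pvExtend (fuel : Nat) (base : Int) (pfx : List Int) (remaining : Int) (out : List (List Int)) : List (List Int) :=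
  match fuel with
  | 0 => out
  | fuel + 1 =>
    if 0 < remaining then pvDigits fuel base pfx remaining out 0
    else   -- remaining == 0
      if PySem.List.pyGet? pfx (-1) = some 0 then out else out ++ [pfx]

def pvDigits (fuel : Nat) (base : Int) (pfx : List Int) (remaining : Int) (out : List (List Int)) (d : Int) : List (List Int) :=
  match fuel with
  | 0 => out
  | fuel + 1 =>
    if d < base then   -- for d in range(base):
      if 96 ≤ out.length then out   -- break
      else if d = 0 ∧ PySem.List.pyGet? pfx (-1) = some 0 then
        pvDigits fuel base pfx remaining out (d + 1)   -- continue
      else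
        pvDigits fuel base pfx remaining (pvExtend fuel base (pfx ++ [d]) (remaining - 1) out) (d + 1)
    else out
end

-- for first in range(1, base) loop with break; fuel is a totality guard only
-- (the loop breaks after at most 96 appends, so 200 iterations always suffice)
def pvFirstLoop (fuel : Nat) (base length : Int) (out : List (List Int)) (first : Int) : List (List Int) :=
  match fuel with
  | 0 => out
  | fuel + 1 =>
    if first < base then
      if 96 ≤ out.length then out   -- break
      else pvFirstLoop fuel base length (pvExtend 100000 base [first] (length - 1) out) (first + 1)
    else out

-- while len(out) < 96 loop; fuel is a totality guard only (length ≤ 13 always suffices)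
def pvLengthLoop (base : Int) (fuel : Nat) (length : Int) (out : List (List Int)) : List (List Int) :=
  match fuel with
  | 0 => out
  | fuel + 1 =>
    if out.length < 96 then pvLengthLoop base fuel (length + 1) (pvFirstLoop 200 base length out 1)
    else out

def get_minimum_average_duration_sequences_alt (k : Int) : List (List Int) :=
  if k + 1 < 2 then []   -- Python: raise ValueError; excluded by Pre_
  else pvLengthLoop (k + 1) 64 1 []

-- ===== PRECONDITION & SPEC =====
-- Pre_ excludes exactly k ≤ 0 (base = k+1 < 2), where Python A raises ValueError.
def Pre_get_minimum_average_duration_sequences (k : Int) : Prop := 1 ≤ k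
instance (k : Int) : Decidable (Pre_get_minimum_average_duration_sequences k) := by unfold Pre_get_minimum_average_duration_sequences; infer_instance
def pvWitness_get_minimum_average_duration_sequences : Int := 1

def Spec_get_minimum_average_duration_sequences (k : Int) (out : List (List Int)) : Prop := out = get_minimum_average_duration_sequences_alt k
instance (k : Int) (out : List (List Int)) : Decidable (Spec_get_minimum_average_duration_sequences k out) := by unfold Spec_get_minimum_average_duration_sequences; infer_instance

-- ===== CLAIM (what is proved, stated in full; the proofs are below) =====
def Claim_equal_get_minimum_average_duration_sequences : Prop := ∀ (k : Int), Dom_get_minimum_average_duration_sequences k → Pre_get_minimum_average_duration_sequences k → Spec_get_minimum_average_duration_sequences k (get_minimum_average_duration_sequences k)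

-- ===== LEMMAS AND PROOFS =====

theorem pv_take_take (n : Nat) (l r : List (List Int)) :
    List.take n (List.take n l ++ r) = List.take n (l ++ r) := by
  by_cases h : l.length ≤ n
  · rw [List.take_of_length_le h]
  · rw [List.take_append_of_le_length (by simp; omega), List.take_take,
        List.take_append_of_le_length (by omega), min_self]

theorem pv_chim_single (b n : Int) (hb : 2 ≤ b) (h1 : 1 ≤ n) (h2 : n < b) :
    pvGetChimingSequence n b = some [n] := by
  have hfuel : ∃ f, n.toNat = f + 1 := ⟨n.toNat - 1, by omega⟩
  obtain ⟨f, hf⟩ := hfuel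
  have hmod : PySem.Int.mod n b = n := by
    rw [PySem.Int.mod_eq_emod_of_pos (by omega)]; exact Int.emod_eq_of_lt (by omega) h2
  have hdiv : PySem.Int.floordiv n b = 0 := by
    rw [PySem.Int.floordiv_eq_ediv_of_pos (by omega)]; exact Int.ediv_eq_zero_of_lt (by omega) h2
  unfold pvGetChimingSequence
  rw [if_neg (by omega), if_neg (by omega)]
  simp only [if_neg (by omega : ¬ n = 0), if_neg (by omega : ¬ b = 1), hf]
  unfold pvChimingLoop
  rw [if_pos (by omega)]
  simp only [hmod, hdiv, if_neg (by omega : ¬ n = 0)]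
  cases f with
  | zero => simp [pvChimingLoop]; omega
  | succ f' => unfold pvChimingLoop; rw [if_neg (by omega)]; simp; omega

theorem pv_loop_zero (f : Nat) (b : Int) (s : Bool) (rep : List Int) :
    pvChimingLoop f b 0 s rep = some rep := by
  cases f <;> simp [pvChimingLoop]

theorem pv_chim_zero (b : Int) (hb : 2 ≤ b) :
    (pvGetChimingSequence 0 b).bind (fun l => if l.isEmpty then none else some l) = none := by
  unfold pvGetChimingSequence
  norm_num

theorem pv_chim_pair (b d e : Int) (hd : 1 ≤ d) (hdb : d < b) (he0 : 0 ≤ e) (heb : e < b) :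
    pvGetChimingSequence (d * b + e) b = if e = 0 then none else some [d, e] := by
  have hb : 2 ≤ b := by omega
  have hn : b ≤ d * b + e := by nlinarith
  have hmod : PySem.Int.mod (d * b + e) b = e := by
    rw [PySem.Int.mod_eq_emod_of_pos (by omega), add_comm, mul_comm, Int.add_mul_emod_self_left]
    exact Int.emod_eq_of_lt he0 heb
  have hdiv : PySem.Int.floordiv (d * b + e) b = d := by
    rw [PySem.Int.floordiv_eq_ediv_of_pos (by omega), add_comm, mul_comm,
        Int.add_mul_ediv_left _ _ (by omega : b ≠ 0), Int.ediv_eq_zero_of_lt he0 heb]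
    omega
  have hmodd : PySem.Int.mod d b = d := by
    rw [PySem.Int.mod_eq_emod_of_pos (by omega)]; exact Int.emod_eq_of_lt (by omega) hdb
  have hdivd : PySem.Int.floordiv d b = 0 := by
    rw [PySem.Int.floordiv_eq_ediv_of_pos (by omega)]; exact Int.ediv_eq_zero_of_lt (by omega) hdb
  have hfuel : ∃ f, (d * b + e).toNat = f + 2 := ⟨(d * b + e).toNat - 2, by omega⟩
  obtain ⟨f, hf⟩ := hfuel
  unfold pvGetChimingSequence
  rw [if_neg (by omega), if_neg (by omega)]
  simp only [if_neg (by omega : ¬ d * b + e = 0), if_neg (by omega : ¬ b = 1), hf]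
  unfold pvChimingLoop
  rw [if_pos (by omega)]
  simp only [hmod, hdiv]
  by_cases he : e = 0
  · rw [if_pos he, if_neg (by simp)]
    unfold pvChimingLoop
    rw [if_pos (by omega)]
    simp only [hmodd, hdivd, if_neg (by omega : ¬ d = 0), pv_loop_zero]
    simp [he]
  · rw [if_neg he]
    unfold pvChimingLoop
    rw [if_pos (by omega)]
    simp only [hmodd, hdivd, if_neg (by omega : ¬ d = 0), pv_loop_zero]
    simp [he]

def pvT1 (b : Int) : List (List Int) := (PySem.List.pyRange 1 b 1).map (fun d => [d])
def pvPairs (b d : Int) : List (List Int) := (PySem.List.pyRange 1 b 1).map (fun e => [d, e])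
def pvT2 (b : Int) : List (List Int) := (PySem.List.pyRange 1 b 1).flatMap (fun d => pvPairs b d)
def pvF (b n : Int) : Option (List Int) := (pvGetChimingSequence n b).bind (fun l => if l.isEmpty then none else some l)

theorem pv_scan1 (b : Int) (hb : 2 ≤ b) :
    (PySem.List.pyRange 0 b 1).filterMap (pvF b) = pvT1 b := by
  rw [PySem.List.pyRange_one_cons (by omega)]
  have h0 : pvF b 0 = none := pv_chim_zero b hb
  simp only [List.filterMap_cons, h0, zero_add]
  unfold pvT1
  rw [← List.filterMap_eq_map]
  apply List.filterMap_congr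
  intro n hn
  have := (PySem.List.mem_pyRange_one).1 hn
  rw [show pvF b n = some [n] by
        unfold pvF; rw [pv_chim_single b n hb (by omega) (by omega)]; rfl]
  rfl

theorem pv_chunk (b d : Int) (hd : 1 ≤ d) (hdb : d < b) :
    (PySem.List.pyRange (d * b) (d * b + b) 1).filterMap (pvF b) = pvPairs b d := by
  have hb : 2 ≤ b := by omega
  have hsplit : PySem.List.pyRange (d * b) (d * b + b) 1 =
      (PySem.List.pyRange 0 b 1).map (fun e => d * b + e) := by
    rw [PySem.List.pyRange_one, PySem.List.pyRange_one,
        show (d * b + b - d * b).toNat = (b - 0).toNat by omega]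
    simp [List.map_map]
  rw [hsplit, List.filterMap_map]
  unfold pvPairs
  rw [PySem.List.pyRange_one_cons (by omega : (0:Int) < b)]
  have h0 : (pvF b ∘ fun e => d * b + e) 0 = none := by
    simp only [Function.comp_apply, add_zero]
    unfold pvF
    have := pv_chim_pair b d 0 hd hdb le_rfl (by omega)
    rw [add_zero] at this
    rw [this]
    rfl
  simp only [List.filterMap_cons, h0, zero_add]
  rw [← List.filterMap_eq_map]
  apply List.filterMap_congr
  intro e he
  have := (PySem.List.mem_pyRange_one).1 he
  simp only [Function.comp_apply]
  unfold pvF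
  rw [pv_chim_pair b d e hd hdb (by omega) (by omega), if_neg (show ¬ e = 0 by omega)]
  rfl

theorem pv_scan2_aux (b : Int) (hb : 2 ≤ b) :
    ∀ j : Nat, (j : Int) ≤ b - 1 →
      (PySem.List.pyRange 0 ((1 + (j : Int)) * b) 1).filterMap (pvF b) =
        pvT1 b ++ (PySem.List.pyRange 1 (1 + (j : Int)) 1).flatMap (pvPairs b) := by
  intro j
  induction j with
  | zero =>
    intro _
    simp only [Nat.cast_zero, add_zero, one_mul]
    rw [pv_scan1 b hb]
    rw [PySem.List.pyRange_one_eq_nil (by omega)]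
    simp
  | succ j ih =>
    intro hj
    push_cast at hj ⊢
    rw [show (1 + ((j:Int) + 1)) * b = (1 + (j:Int)) * b + b by ring]
    rw [PySem.List.pyRange_one_append 0 ((1 + (j:Int)) * b) ((1 + (j:Int)) * b + b)
          (by nlinarith) (by omega)]
    rw [List.filterMap_append, ih (by omega)]
    rw [pv_chunk b (1 + (j:Int)) (by omega) (by omega)]
    rw [show (1:Int) + ((j:Int) + 1) = (1 + (j:Int)) + 1 by ring]
    rw [PySem.List.pyRange_one_succ_right (by omega)]
    simp [List.flatMap_append]

theorem pv_scan2 (b : Int) (hb : 2 ≤ b) :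
    (PySem.List.pyRange 0 (b * b) 1).filterMap (pvF b) = pvT1 b ++ pvT2 b := by
  have h := pv_scan2_aux b hb (b - 1).toNat (by omega)
  rw [show (1 + (((b - 1).toNat : Nat) : Int)) = b by omega] at h
  exact h

theorem pv_len_T1 (b : Int) : (pvT1 b).length = (b - 1).toNat := by
  simp [pvT1, PySem.List.length_pyRange_one]

theorem pv_len_T2 (b : Int) : (pvT2 b).length = (b - 1).toNat * (b - 1).toNat := by
  simp [pvT2, pvPairs, List.length_flatMap, PySem.List.length_pyRange_one, List.map_const']

theorem pv_extend0 (f : Nat) (b d : Int) (out : List (List Int)) (hf : 1 ≤ f) (hd : 1 ≤ d) :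
    pvExtend f b [d] 0 out = out ++ [[d]] := by
  obtain ⟨f', rfl⟩ : ∃ f', f = f' + 1 := ⟨f - 1, by omega⟩
  unfold pvExtend
  rw [if_neg (by omega)]
  rw [if_neg (by simp [PySem.List.pyGet?_neg_one]; omega)]

theorem pv_digits1 (b d : Int) (hd : 1 ≤ d) (hb : 2 ≤ b) :
    ∀ (f : Nat) (e : Int) (out : List (List Int)), 1 ≤ e → out.length ≤ 96 →
      min (b - e).toNat (97 - out.length) < f →
      pvDigits f b [d] 1 out e = List.take 96 (out ++ (PySem.List.pyRange e b 1).map (fun e' => [d, e'])) := by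
  intro f
  induction f with
  | zero => omega
  | succ f ih =>
    intro e out he hout hmin
    unfold pvDigits
    by_cases heb : e < b
    · rw [if_pos heb]
      by_cases hfull : 96 ≤ out.length
      · rw [if_pos hfull]
        have : out.length = 96 := by omega
        rw [List.take_append_of_le_length (by omega), List.take_of_length_le (by omega)]
      · rw [if_neg hfull, if_neg (by simp [PySem.List.pyGet?_neg_one]; omega)]
        have hext : pvExtend f b ([d] ++ [e]) (1 - 1) out = out ++ [[d, e]] := by
          have hf1 : 1 ≤ f := by omega
          rw [show ([d] ++ [e]) = [d, e] from rfl]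
          obtain ⟨f', rfl⟩ : ∃ f', f = f' + 1 := ⟨f - 1, by omega⟩
          unfold pvExtend
          rw [if_neg (by omega)]
          rw [if_neg (by simp [PySem.List.pyGet?_neg_one]; omega)]
        rw [hext]
        rw [ih (e + 1) (out ++ [[d, e]]) (by omega) (by simp; omega) (by simp; omega)]
        rw [PySem.List.pyRange_one_cons heb]
        simp
    · rw [if_neg heb]
      rw [PySem.List.pyRange_one_eq_nil (by omega)]
      simp [List.take_of_length_le hout]

theorem pv_extend1 (f : Nat) (b d : Int) (out : List (List Int)) (hf : 1000 ≤ f)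
    (hd : 1 ≤ d) (hb : 2 ≤ b) (hout : out.length ≤ 96) :
    pvExtend f b [d] 1 out = List.take 96 (out ++ pvPairs b d) := by
  obtain ⟨f', rfl⟩ : ∃ f', f = f' + 1 := ⟨f - 1, by omega⟩
  unfold pvExtend
  rw [if_pos (by omega)]
  obtain ⟨f'', rfl⟩ : ∃ g, f' = g + 1 := ⟨f' - 1, by omega⟩
  unfold pvDigits
  rw [if_pos (by omega)]
  by_cases hfull : 96 ≤ out.length
  · rw [if_pos hfull]
    have : out.length = 96 := by omega
    rw [List.take_append_of_le_length (by omega), List.take_of_length_le (by omega)]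
  · rw [if_neg hfull, if_neg (by simp [PySem.List.pyGet?_neg_one]; omega)]
    have hskip : pvExtend f'' b ([d] ++ [(0:Int)]) (1 - 1) out = out := by
      obtain ⟨g, rfl⟩ : ∃ g, f'' = g + 1 := ⟨f'' - 1, by omega⟩
      unfold pvExtend
      rw [if_neg (by omega), if_pos (by simp [PySem.List.pyGet?_neg_one])]
    rw [hskip]
    rw [show (0:Int) + 1 = 1 by norm_num]
    rw [pv_digits1 b d hd hb f'' 1 out le_rfl hout (by omega)]
    rfl

theorem pv_firstLoop1 (b : Int) (hb : 2 ≤ b) :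
    ∀ (f : Nat) (first : Int) (out : List (List Int)), 1 ≤ first → out.length ≤ 96 →
      min (b - first).toNat (97 - out.length) < f →
      pvFirstLoop f b 1 out first = List.take 96 (out ++ (PySem.List.pyRange first b 1).map (fun d => [d])) := by
  intro f
  induction f with
  | zero => omega
  | succ f ih =>
    intro first out hfirst hout hmin
    unfold pvFirstLoop
    by_cases hfb : first < b
    · rw [if_pos hfb]
      by_cases hfull : 96 ≤ out.length
      · rw [if_pos hfull]
        have : out.length = 96 := by omega
        rw [List.take_append_of_le_length (by omega), List.take_of_length_le (by omega)]
      · rw [if_neg hfull]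
        rw [show (1:Int) - 1 = 0 by norm_num, pv_extend0 100000 b first out (by omega) hfirst]
        rw [ih (first + 1) (out ++ [[first]]) (by omega) (by simp; omega) (by simp; omega)]
        rw [PySem.List.pyRange_one_cons hfb]
        simp
    · rw [if_neg hfb]
      rw [PySem.List.pyRange_one_eq_nil (by omega)]
      simp [List.take_of_length_le hout]

theorem pv_firstLoop2 (b : Int) (hb : 2 ≤ b) :
    ∀ (f : Nat) (first : Int) (out : List (List Int)), 1 ≤ first → out.length ≤ 96 →
      min (b - first).toNat (97 - out.length) < f →
      pvFirstLoop f b 2 out first = List.take 96 (out ++ (PySem.List.pyRange first b 1).flatMap (pvPairs b)) := by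
  intro f
  induction f with
  | zero => omega
  | succ f ih =>
    intro first out hfirst hout hmin
    unfold pvFirstLoop
    by_cases hfb : first < b
    · rw [if_pos hfb]
      by_cases hfull : 96 ≤ out.length
      · rw [if_pos hfull]
        have : out.length = 96 := by omega
        rw [List.take_append_of_le_length (by omega), List.take_of_length_le (by omega)]
      · rw [if_neg hfull]
        rw [show (2:Int) - 1 = 1 by norm_num, pv_extend1 100000 b first out (by omega) hfirst hb hout]
        have hlen1 : 1 ≤ (pvPairs b first).length := by
          simp [pvPairs, PySem.List.length_pyRange_one]; omega
        have hout' : (List.take 96 (out ++ pvPairs b first)).length ≤ 96 := by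
          simp
        have hgrow : out.length < (List.take 96 (out ++ pvPairs b first)).length := by
          simp [List.length_take, List.length_append]; omega
        rw [ih (first + 1) _ (by omega) hout' (by omega)]
        rw [PySem.List.pyRange_one_cons hfb]
        rw [List.flatMap_cons]
        rw [pv_take_take, List.append_assoc]
    · rw [if_neg hfb]
      rw [PySem.List.pyRange_one_eq_nil (by omega)]
      simp [List.take_of_length_le hout]

theorem pv_A_large (k : Int) (hk : 10 ≤ k) :
    get_minimum_average_duration_sequences k =
      if k + 1 ≤ 96 then List.take 96 (pvT1 (k+1) ++ pvT2 (k+1)) else List.take 96 (pvT1 (k+1)) := by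
  have hb : 2 ≤ k + 1 := by omega
  set b := k + 1 with hbdef
  have ht : 10 ≤ (b - 1).toNat := by omega
  have hcomp : ((fun c : Option (List Int) => c.bind (fun l => if l.isEmpty then none else some l)) ∘
      (fun n => pvGetChimingSequence n b)) = pvF b := rfl
  have hscan2' : (((PySem.List.pyRange 0 (b ^ (2:Nat)) 1).map (fun n => pvGetChimingSequence n b)).filterMap
      (fun c => c.bind (fun l => if l.isEmpty then none else some l))) = pvT1 b ++ pvT2 b := by
    rw [List.filterMap_map, hcomp, show b ^ (2:Nat) = b * b by ring, pv_scan2 b hb]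
  have hscan1' : (((PySem.List.pyRange 0 (b ^ (1:Nat)) 1).map (fun n => pvGetChimingSequence n b)).filterMap
      (fun c => c.bind (fun l => if l.isEmpty then none else some l))) = pvT1 b := by
    rw [List.filterMap_map, hcomp, show b ^ (1:Nat) = b by ring, pv_scan1 b hb]
  have hlen12 : ¬ (pvT1 b ++ pvT2 b).length < 96 := by
    rw [List.length_append, pv_len_T1, pv_len_T2]
    nlinarith [ht]
  unfold get_minimum_average_duration_sequences
  rw [if_neg (by omega)]
  rw [← hbdef]
  unfold pvOuterLoop
  rw [if_pos (by norm_num)]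
  rw [show ((0:Int) + 1).toNat = 1 by norm_num]
  by_cases h96 : b < 96
  · -- bases 11..95: the ndigits = 1 round is skipped, the loop stops after ndigits = 2
    rw [if_pos (by rw [pow_one]; omega)]
    unfold pvOuterLoop
    rw [if_pos (by norm_num)]
    rw [show ((0:Int) + 1 + 1).toNat = 2 by decide]
    rw [if_neg (by rw [show b ^ (2:Nat) = b * b by ring]; nlinarith)]
    rw [hscan2']
    unfold pvOuterLoop
    rw [if_neg hlen12]
    rw [if_pos (by omega)]
  · rw [if_neg (by rw [pow_one]; omega)]
    rw [hscan1']
    by_cases h97 : 97 ≤ b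
    · -- bases ≥ 97: the singles already suffice
      unfold pvOuterLoop
      rw [if_neg (by rw [pv_len_T1]; omega)]
      rw [if_neg (by omega)]
    · -- base = 96: singles computed but not enough, loop continues to ndigits = 2
      have hb96 : b = 96 := by omega
      unfold pvOuterLoop
      rw [if_pos (by rw [pv_len_T1]; omega)]
      rw [show ((0:Int) + 1 + 1).toNat = 2 by decide]
      rw [if_neg (by rw [show b ^ (2:Nat) = b * b by ring]; nlinarith)]
      rw [hscan2']
      unfold pvOuterLoop
      rw [if_neg hlen12]
      rw [if_pos (by omega)]

theorem pv_B_large (k : Int) (hk : 10 ≤ k) :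
    get_minimum_average_duration_sequences_alt k =
      if k + 1 ≤ 96 then List.take 96 (pvT1 (k+1) ++ pvT2 (k+1)) else List.take 96 (pvT1 (k+1)) := by
  have hb : 2 ≤ k + 1 := by omega
  set b := k + 1 with hbdef
  have ht : 10 ≤ (b - 1).toNat := by omega
  unfold get_minimum_average_duration_sequences_alt
  rw [if_neg (by omega), ← hbdef]
  unfold pvLengthLoop
  rw [if_pos (by norm_num)]
  rw [pv_firstLoop1 b hb 200 1 [] le_rfl (by simp) (by simp only [List.length_nil]; omega)]
  rw [List.nil_append]
  have hT1 : (PySem.List.pyRange 1 b 1).map (fun d => [d]) = pvT1 b := rfl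
  rw [hT1]
  by_cases h96 : b ≤ 96
  · have htake : List.take 96 (pvT1 b) = pvT1 b := List.take_of_length_le (by rw [pv_len_T1]; omega)
    rw [htake]
    unfold pvLengthLoop
    rw [if_pos (by rw [pv_len_T1]; omega)]
    rw [show (1:Int) + 1 = 2 by norm_num]
    rw [pv_firstLoop2 b hb 200 1 (pvT1 b) le_rfl (by rw [pv_len_T1]; omega) (by rw [pv_len_T1]; omega)]
    have hT2 : (PySem.List.pyRange 1 b 1).flatMap (pvPairs b) = pvT2 b := rfl
    rw [hT2]
    unfold pvLengthLoop
    rw [if_neg (by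
      rw [List.length_take, List.length_append, pv_len_T1, pv_len_T2]
      have : 96 ≤ (b-1).toNat + (b-1).toNat * (b-1).toNat := by nlinarith [ht]
      omega)]
    rw [if_pos (by omega)]
  · unfold pvLengthLoop
    rw [if_neg (by rw [List.length_take, pv_len_T1]; omega)]
    rw [if_neg (by omega)]

set_option maxRecDepth 100000 in
set_option maxHeartbeats 4000000 in
theorem pv_small_bool :
    ((List.range 9).all (fun i => get_minimum_average_duration_sequences ((i : Int) + 1) == get_minimum_average_duration_sequences_alt ((i : Int) + 1))) = true := by
  decide

theorem pv_small (k : Int) (h1 : 1 ≤ k) (h2 : k ≤ 9) :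
    get_minimum_average_duration_sequences k = get_minimum_average_duration_sequences_alt k := by
  have hall := pv_small_bool
  rw [List.all_eq_true] at hall
  have h := hall ((k - 1).toNat) (by rw [List.mem_range]; omega)
  rw [beq_iff_eq] at h
  rw [show ((((k - 1).toNat : Nat) : Int) + 1) = k by omega] at h
  exact h

-- ===== VERDICT (by name: the statement is the Claim_ definition above) =====
theorem get_minimum_average_duration_sequences_spec : Claim_equal_get_minimum_average_duration_sequences := by
  intro k hdom hpre
  unfold Spec_get_minimum_average_duration_sequences
  unfold Pre_get_minimum_average_duration_sequences at hpre
  by_cases hk : k ≤ 9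
  · exact pv_small k hpre hk
  · rw [pv_A_large k (by omega), pv_B_large k (by omega)]
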